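-- pv_equiv track=rewrite | github.com/metachungoid/tourneytracker | app.py | _seeded_bracket_order
-- ===== SOURCE A (Python) =====
-- def _seeded_bracket_order(n):
--     """Return seed numbers in bracket-slot order for a power-of-2 bracket of size n.
--     Result: [1,8,4,5,2,7,3,6] for n=8 → matches (1v8),(4v5),(2v7),(3v6)."""
--     positions = [1, 2]
--     while len(positions) < n:
--         size = len(positions)
--         nxt = []
--         for p in positions:
--             nxt.extend([p, 2 * size + 1 - p])
--         positions = nxt
--     return positions
-- ===== SOURCE B (Python) =====
-- def _seeded_bracket_order(n):
--     # Per-slot bit computation: m = next power of two >= n (min 2), then each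
--     # slot value is derived directly from the bits of its index.
--     m = 1 << max(n - 1, 1).bit_length()
--     r = m.bit_length() - 1
--     out = []
--     for i in range(m):
--         v = (i >> (r - 1) & 1) + 1
--         s = 2
--         for b in range(r - 2, -1, -1):
--             s *= 2
--             if i >> b & 1:
--                 v = s + 1 - v
--         out.append(v)
--     return out
-- ===== Notes on version B (the rewrite author's own statement) =====
-- stated objective: alternative
-- what changed: Replaces A's repeated list-doubling (each pass interleaving p with 2*size+1-p) by a direct per-slot computation: the bracket size m is obtained from bit_length and each slot value is computed independently from the bits of its index.
import Mathlib
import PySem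

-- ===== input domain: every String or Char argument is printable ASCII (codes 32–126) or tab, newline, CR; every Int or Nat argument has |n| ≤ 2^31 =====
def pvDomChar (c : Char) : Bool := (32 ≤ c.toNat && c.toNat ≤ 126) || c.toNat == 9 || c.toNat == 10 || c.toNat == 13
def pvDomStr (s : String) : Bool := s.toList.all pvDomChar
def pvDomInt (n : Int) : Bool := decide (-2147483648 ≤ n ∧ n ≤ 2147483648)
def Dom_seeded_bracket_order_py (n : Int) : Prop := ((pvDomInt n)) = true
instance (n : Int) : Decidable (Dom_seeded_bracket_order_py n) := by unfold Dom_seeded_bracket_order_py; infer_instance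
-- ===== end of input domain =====

-- B replaces A's list-doubling construction by a per-slot computation from the bits of the
-- slot index (objective: alternative decomposition, not faster).

-- ===== PORT A =====
-- A's 'while len(positions) < n' loop; the fuel n.toNat bounds its iteration count (the list
-- length doubles from 2 each pass, so n.toNat passes always suffice — proved in loopA_eq_refL below).
def loopA : Nat → Int → List Int → List Int
  | 0, _, positions => positions
  | fuel + 1, n, positions =>
    if (positions.length : Int) < n then
      let size : Int := (positions.length : Int)
      loopA fuel n (positions.foldl (fun acc p => acc ++ [p, 2 * size + 1 - p]) [])
    else positions

def seeded_bracket_order_py (n : Int) : List Int := loopA n.toNat n [1, 2]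

-- ===== PORT B =====
-- 'fstep i' is the body of Source B's inner 'for b in range(r-2,-1,-1)' loop, with state (v, s).
def fstep (i : Int) (vs : Int × Int) (b : Int) : Int × Int :=
  let s := vs.2 * 2
  -- 'i >> b & 1': b ≥ 0 on every element of the range, so b.toNat is exact
  if PySem.Int.band (i >>> b.toNat) 1 ≠ 0 then (s + 1 - vs.1, s)
  else (vs.1, s)

-- per-slot value: 'v = (i >> (r - 1) & 1) + 1' then the inner loop (r ≥ 1 always holds)
def gfun (r : Nat) (i : Int) : Int :=
  ((PySem.List.pyRange ((r : Int) - 2) (-1) (-1)).foldl (fstep i)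
    (PySem.Int.band (i >>> (r - 1)) 1 + 1, 2)).1

def seeded_bracket_order_py_alt (n : Int) : List Int :=
  let m : Int := (1 : Int) <<< PySem.Int.bitLength (max (n - 1) 1)
  let r : Nat := PySem.Int.bitLength m - 1
  (PySem.List.pyRange 0 m 1).map (gfun r)

-- ===== PRECONDITION & SPEC =====
def Spec_seeded_bracket_order_py (n : Int) (out : List Int) : Prop := out = seeded_bracket_order_py_alt n
instance (n : Int) (out : List Int) : Decidable (Spec_seeded_bracket_order_py n out) := by unfold Spec_seeded_bracket_order_py; infer_instance

-- ===== CLAIM (what is proved, stated in full; the proofs are below) =====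
def Claim_equal_seeded_bracket_order_py : Prop := ∀ (n : Int), Dom_seeded_bracket_order_py n → Spec_seeded_bracket_order_py n (seeded_bracket_order_py n)

-- ===== LEMMAS AND PROOFS =====

-- Reference: the bracket after k doublings.
def refStep (l : List Int) : List Int := l.flatMap (fun p => [p, 2 * (l.length : Int) + 1 - p])

def refL : Nat → List Int
  | 0 => [1, 2]
  | k + 1 => refStep (refL k)

theorem length_refStep (l : List Int) : (refStep l).length = 2 * l.length := by
  simp [refStep, List.length_flatMap, List.map_const']
  omega

theorem length_refL (k : Nat) : (refL k).length = 2 ^ (k + 1) := by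
  induction k with
  | zero => rfl
  | succ k ih => simp [refL, length_refStep, ih]; ring

-- A's loop, started at refL k with enough fuel, reaches refL (t - 1).
theorem loopA_eq_refL (t : Nat) (n : Int) (hle : n ≤ 2 ^ t)
    (hmin : 2 ≤ t → (2 : Int) ^ (t - 1) < n) :
    ∀ fuel k, k + 1 ≤ t → t - 1 - k ≤ fuel → loopA fuel n (refL k) = refL (t - 1) := by
  intro fuel
  induction fuel with
  | zero =>
    intro k hk hf
    have : k = t - 1 := by omega
    subst this; rfl
  | succ f ih =>
    intro k hk hf
    have hlen : ((refL k).length : Int) = (2 : Int) ^ (k + 1) := by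
      rw [length_refL]; push_cast; ring
    rw [loopA]
    by_cases h : ((refL k).length : Int) < n
    · rw [if_pos h]
      have hklt : k + 1 < t := by
        by_contra hc
        have hkt : k + 1 = t := by omega
        rw [hlen, hkt] at h
        linarith
      show loopA f n ((refL k).foldl
          (fun acc p => acc ++ [p, 2 * ((refL k).length : Int) + 1 - p]) []) = refL (t - 1)
      have hstep : (refL k).foldl
          (fun acc p => acc ++ [p, 2 * ((refL k).length : Int) + 1 - p]) [] = refL (k + 1) := by
        rw [PySem.List.foldl_append_eq_flatMap]
        simp [refL, refStep]
      rw [hstep]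
      exact ih (k + 1) (by omega) (by omega)
    · rw [if_neg h]
      have hkt : k + 1 = t := by
        by_contra hc
        have h2t : 2 ≤ t := by omega
        have hm := hmin h2t
        have hmono : (2 : Int) ^ (k + 1) ≤ (2 : Int) ^ (t - 1) :=
          pow_le_pow_right₀ (by norm_num) (by omega)
        rw [hlen] at h
        rw [not_lt] at h
        linarith
      have : k = t - 1 := by omega
      rw [this]

-- division form of the inner-loop step ('x >> k & 1' = 'x // 2**k % 2'), for the proofs
def fstepD (i : Int) (vs : Int × Int) (b : Int) : Int × Int :=
  let s := vs.2 * 2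
  if PySem.Int.mod (PySem.Int.floordiv i ((2 : Int) ^ b.toNat)) 2 ≠ 0 then (s + 1 - vs.1, s)
  else (vs.1, s)

def gfunD (r : Nat) (i : Int) : Int :=
  ((PySem.List.pyRange ((r : Int) - 2) (-1) (-1)).foldl (fstepD i)
    (PySem.Int.mod (PySem.Int.floordiv i ((2 : Int) ^ (r - 1))) 2 + 1, 2)).1

theorem band_shift (i : Int) (k : Nat) :
    PySem.Int.band (i >>> k) 1 = PySem.Int.mod (PySem.Int.floordiv i ((2 : Int) ^ k)) 2 := by
  rw [PySem.Int.band_one, PySem.Int.floordiv_eq_ediv_of_pos (by positivity),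
      Int.shiftRight_eq_div_pow]
  norm_cast

theorem fstep_eq (i : Int) : fstep i = fstepD i := by
  funext vs b
  simp only [fstep, fstepD, band_shift]

theorem gfun_eq (r : Nat) (i : Int) : gfun r i = gfunD r i := by
  simp only [gfun, gfunD, fstep_eq, band_shift]

-- the inner loop doubles s once per step
theorem snd_foldl_fstep (i : Int) (X : List Int) : ∀ v s : Int,
    ((X.foldl (fstepD i) (v, s)).2) = s * 2 ^ X.length := by
  induction X with
  | nil => intro v s; simp
  | cons b X ih =>
    intro v s
    simp only [List.foldl_cons, fstepD]
    split_ifs <;> rw [ih, List.length_cons, pow_succ] <;> ring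

-- shifting every bit index up by one is dividing i by two first
theorem foldl_fstep_shift (i : Int) (X : List Int) (hX : ∀ b ∈ X, 0 ≤ b) :
    ∀ vs : Int × Int, (X.map (· + 1)).foldl (fstepD i) vs
      = X.foldl (fstepD (PySem.Int.floordiv i 2)) vs := by
  induction X with
  | nil => intro vs; rfl
  | cons b X ih =>
    intro vs
    have hb : (0 : Int) ≤ b := hX b (List.mem_cons_self)
    have hstep : fstepD i vs (b + 1) = fstepD (PySem.Int.floordiv i 2) vs b := by
      have htn : (b + 1).toNat = b.toNat + 1 := by omega
      have hdiv : PySem.Int.floordiv i ((2 : Int) ^ (b + 1).toNat)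
          = PySem.Int.floordiv (PySem.Int.floordiv i 2) ((2 : Int) ^ b.toNat) := by
        rw [PySem.Int.floordiv_eq_ediv_of_pos (by positivity),
            PySem.Int.floordiv_eq_ediv_of_pos (by norm_num),
            PySem.Int.floordiv_eq_ediv_of_pos (by positivity),
            Int.ediv_ediv_of_nonneg (by norm_num), htn]
        ring_nf
      simp only [fstepD, hdiv]
    simp only [List.map_cons, List.foldl_cons, hstep]
    exact ih (fun x hx => hX x (List.mem_cons_of_mem _ hx)) _

theorem range_down_snoc (a : Int) (ha : 0 ≤ a) :
    PySem.List.pyRange a (-1) (-1)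
      = (PySem.List.pyRange (a - 1) (-1) (-1)).map (· + 1) ++ [(0 : Int)] := by
  rw [PySem.List.pyRange_neg_one, PySem.List.pyRange_neg_one]
  have h1 : (a - -1).toNat = a.toNat + 1 := by omega
  have h2 : (a - 1 - -1).toNat = a.toNat := by omega
  rw [h1, h2, List.range_succ]
  have h3 : a - (a.toNat : Int) = 0 := by omega
  simp only [List.map_append, List.map_map, List.map_cons, List.map_nil, h3]
  congr 1
  exact List.map_congr_left (fun k _ => by simp [Function.comp]; ring)

-- peeling the lowest bit of the slot index
theorem gfun_succ (t : Nat) (ht : 1 ≤ t) (i : Int) :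
    gfunD (t + 1) i = if PySem.Int.mod i 2 ≠ 0
      then 2 ^ (t + 1) + 1 - gfunD t (PySem.Int.floordiv i 2)
      else gfunD t (PySem.Int.floordiv i 2) := by
  have h1 : ((t + 1 : Nat) : Int) - 2 = (t : Int) - 1 := by push_cast; ring
  have h2 : (t : Int) - 1 - 1 = (t : Int) - 2 := by ring
  have hpow : (2 : Int) ^ t = 2 * 2 ^ (t - 1) := by
    conv_lhs => rw [show t = 1 + (t - 1) by omega]
    rw [pow_add, pow_one]
  have hv0 : PySem.Int.floordiv i ((2 : Int) ^ (t + 1 - 1))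
      = PySem.Int.floordiv (PySem.Int.floordiv i 2) ((2 : Int) ^ (t - 1)) := by
    rw [Nat.add_sub_cancel, hpow,
        PySem.Int.floordiv_eq_ediv_of_pos (by positivity),
        PySem.Int.floordiv_eq_ediv_of_pos (by norm_num),
        PySem.Int.floordiv_eq_ediv_of_pos (by positivity),
        Int.ediv_ediv_of_nonneg (by norm_num)]
  have hmem : ∀ b ∈ PySem.List.pyRange ((t : Int) - 2) (-1) (-1), (0 : Int) ≤ b := by
    intro b hb
    rw [PySem.List.mem_pyRange_neg_one] at hb
    omega
  rw [gfunD, h1, range_down_snoc _ (by omega), h2, hv0, List.foldl_append,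
      foldl_fstep_shift i _ hmem]
  have hlen : (PySem.List.pyRange ((t : Int) - 2) (-1) (-1)).length = t - 1 := by
    rw [PySem.List.length_pyRange_neg_one]
    omega
  set Q := (PySem.List.pyRange ((t : Int) - 2) (-1) (-1)).foldl (fstepD (PySem.Int.floordiv i 2))
      (PySem.Int.mod (PySem.Int.floordiv (PySem.Int.floordiv i 2) ((2 : Int) ^ (t - 1))) 2 + 1, 2)
      with hQ
  have hQ1 : Q.1 = gfunD t (PySem.Int.floordiv i 2) := by rw [gfunD]
  have hQ2 : Q.2 = (2 : Int) ^ t := by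
    rw [hQ, snd_foldl_fstep, hlen, hpow]
  have hi1 : PySem.Int.floordiv i ((2 : Int) ^ ((0 : Int)).toNat) = i := by
    rw [PySem.Int.floordiv_eq_ediv_of_pos (by norm_num)]
    simp
  simp only [List.foldl_cons, List.foldl_nil, fstepD, hi1]
  split_ifs with h
  · simp [hQ1, hQ2]; ring
  · simp [hQ1]

theorem hdm (j : Int) :
    PySem.Int.mod (2 * j) 2 = 0 ∧ PySem.Int.floordiv (2 * j) 2 = j ∧
    PySem.Int.mod (2 * j + 1) 2 = 1 ∧ PySem.Int.floordiv (2 * j + 1) 2 = j := by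
  rw [PySem.Int.mod_eq_emod_of_pos (by norm_num), PySem.Int.mod_eq_emod_of_pos (by norm_num),
      PySem.Int.floordiv_eq_ediv_of_pos (by norm_num), PySem.Int.floordiv_eq_ediv_of_pos (by norm_num)]
  refine ⟨?_, ?_, ?_, ?_⟩ <;> omega

theorem pyRange_double (M : Nat) :
    PySem.List.pyRange 0 ((2 * M : Nat) : Int) 1
      = (PySem.List.pyRange 0 ((M : Nat) : Int) 1).flatMap (fun j => [2 * j, 2 * j + 1]) := by
  induction M with
  | zero => simp [PySem.List.pyRange_one_eq_nil]
  | succ M ih =>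
    have e1 : ((2 * (M + 1) : Nat) : Int) = (2 * (M : Nat) : Nat) + 1 + 1 := by push_cast; ring
    have e2 : ((M + 1 : Nat) : Int) = ((M : Nat) : Int) + 1 := by push_cast; ring
    rw [e1, PySem.List.pyRange_one_succ_right (by positivity),
        PySem.List.pyRange_one_succ_right (by positivity), ih, e2,
        PySem.List.pyRange_one_succ_right (by positivity), List.flatMap_append]
    simp

theorem map_gfun_eq_refL (t : Nat) (ht : 1 ≤ t) :
    (PySem.List.pyRange 0 ((2 : Int) ^ t) 1).map (gfunD t) = refL (t - 1) := by
  induction t, ht using Nat.le_induction with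
  | base => decide
  | succ t ht ih =>
    obtain ⟨s, rfl⟩ : ∃ s, t = s + 1 := ⟨t - 1, by omega⟩
    simp only [Nat.add_sub_cancel] at ih ⊢
    have hcast : ((2 * 2 ^ (s + 1) : Nat) : Int) = (2 : Int) ^ (s + 1 + 1) := by push_cast; ring
    rw [← hcast, pyRange_double (2 ^ (s + 1)), List.map_flatMap]
    have hfun : ∀ j : Int, ([2 * j, 2 * j + 1]).map (gfunD (s + 1 + 1))
        = [gfunD (s + 1) j, 2 ^ (s + 1 + 1) + 1 - gfunD (s + 1) j] := by
      intro j
      obtain ⟨h0, h1, h2, h3⟩ := hdm j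
      simp only [List.map_cons, List.map_nil, gfun_succ (s + 1) (by omega)]
      rw [h0, h1, h2, h3]
      simp
    simp only [hfun]
    have hrefl : refL (s + 1) = (refL s).flatMap
        (fun p => [p, 2 ^ (s + 1 + 1) + 1 - p]) := by
      show refStep (refL s) = _
      rw [refStep]
      congr 1
      funext p
      rw [length_refL]
      push_cast
      congr 2
      ring
    rw [hrefl, ← ih, List.flatMap_map]
    norm_cast

-- bit_length of an exact power of two
theorem bitLength_two_pow (t : Nat) : PySem.Int.bitLength ((2 : Int) ^ t) = t + 1 := by
  have h1 := PySem.Int.lt_two_pow_bitLength ((2 : Int) ^ t)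
  have h2 := PySem.Int.two_pow_bitLength_le ((2 : Int) ^ t) (pow_ne_zero t (by norm_num))
  have hna : ((2 : Int) ^ t).natAbs = 2 ^ t := by simp [Int.natAbs_pow]
  rw [hna] at h1 h2
  have hb1 : t < PySem.Int.bitLength ((2 : Int) ^ t) :=
    (Nat.pow_lt_pow_iff_right (by norm_num)).mp h1
  have hb2 : PySem.Int.bitLength ((2 : Int) ^ t) - 1 ≤ t :=
    (Nat.pow_le_pow_iff_right (by norm_num)).mp h2
  omega

theorem pyB_eq (n : Int) : seeded_bracket_order_py_alt n =
    (PySem.List.pyRange 0 ((2 : Int) ^ PySem.Int.bitLength (max (n - 1) 1)) 1).map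
      (gfunD (PySem.Int.bitLength (max (n - 1) 1))) := by
  have hshift : (1 : Int) <<< PySem.Int.bitLength (max (n - 1) 1)
      = (2 : Int) ^ PySem.Int.bitLength (max (n - 1) 1) := by
    rw [Int.shiftLeft_eq]; ring
  simp only [seeded_bracket_order_py_alt, hshift, bitLength_two_pow, Nat.add_sub_cancel]
  exact List.map_congr_left (fun i _ => gfun_eq _ i)

-- ===== VERDICT (by name: the statement is the Claim_ definition above) =====
theorem seeded_bracket_order_py_spec : Claim_equal_seeded_bracket_order_py := by
  intro n _
  unfold Spec_seeded_bracket_order_py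
  obtain ⟨t, htdef⟩ : ∃ t, t = PySem.Int.bitLength (max (n - 1) 1) := ⟨_, rfl⟩
  have hx1 : (1 : Int) ≤ max (n - 1) 1 := le_max_right _ _
  have hxa : ((max (n - 1) 1).natAbs : Int) = max (n - 1) 1 :=
    Int.natAbs_of_nonneg (by omega)
  have hub := PySem.Int.lt_two_pow_bitLength (max (n - 1) 1)
  have hlb := PySem.Int.two_pow_bitLength_le (max (n - 1) 1) (by omega)
  rw [← htdef] at hub hlb
  have hn2t : n ≤ (2 : Int) ^ t := by
    have h1 : ((max (n - 1) 1).natAbs : Int) < (((2 : Nat) ^ t : Nat) : Int) := by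
      exact_mod_cast hub
    rw [hxa] at h1
    push_cast at h1
    have h2 : n - 1 ≤ max (n - 1) 1 := le_max_left _ _
    linarith
  have ht1 : 1 ≤ t := by
    by_contra hc
    have ht0 : t = 0 := by omega
    rw [ht0, pow_zero] at hub
    omega
  have hmin : 2 ≤ t → (2 : Int) ^ (t - 1) < n := by
    intro h2
    by_cases hn : n ≤ 2
    · have hxe : max (n - 1) 1 = 1 := max_eq_right (by omega)
      rw [hxe] at htdef
      have : t = 1 := by rw [htdef]; decide
      omega
    · have hxe : max (n - 1) 1 = n - 1 := max_eq_left (by omega)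
      have h1 : (((2 : Nat) ^ (t - 1) : Nat) : Int) ≤ ((max (n - 1) 1).natAbs : Int) := by
        exact_mod_cast hlb
      rw [hxa, hxe] at h1
      push_cast at h1
      linarith
  have hfuel : t - 1 ≤ n.toNat := by
    by_cases h2 : 2 ≤ t
    · have hm := hmin h2
      have hc : (((2 : Nat) ^ (t - 1) : Nat) : Int) < n := by push_cast; exact hm
      have hs := Nat.lt_two_pow_self (n := t - 1)
      omega
    · omega
  rw [pyB_eq n, ← htdef, map_gfun_eq_refL t ht1, seeded_bracket_order_py]
  exact loopA_eq_refL t n hn2t hmin n.toNat 0 ht1 (by omega)
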